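-- pv_equiv track=rewrite | github.com/lty12b9b0a1/SKEL | benchmarks_new/strsim/source.py | distance_profile
-- ===== SOURCE A (Python) =====
-- def distance_profile(profile0, profile1):
--     union = set()
--     for k in profile0.keys():
--         union.add(k)
--     for k in profile1.keys():
--         union.add(k)
--     agg = 0
--     for k in union:
--         v0, v1 = 0, 0
--         if profile0.get(k) is not None:
--             v0 = int(profile0.get(k))
--         if profile1.get(k) is not None:
--             v1 = int(profile1.get(k))
--         agg += abs(v0 - v1)
--     return agg
-- ===== SOURCE B (Python) =====
-- def distance_profile(profile0, profile1):
--     # Build one signed-difference map: diff[k] = v0 - v1; then sum |diff| once.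
--     diff = {}
--     for k, v in profile0.items():
--         diff[k] = diff.get(k, 0) + (int(v) if v is not None else 0)
--     for k, v in profile1.items():
--         diff[k] = diff.get(k, 0) - (int(v) if v is not None else 0)
--     return sum(abs(x) for x in diff.values())
-- ===== Notes on version B (the rewrite author's own statement) =====
-- stated objective: alternative
-- what changed: Replaces A's materialised union set with per-key double lookups and abs inside the loop by accumulating a single signed-difference dict (diff[k] = v0 - v1) in two modify-folds and summing absolute values of its values once at the end.
import Mathlib
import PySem

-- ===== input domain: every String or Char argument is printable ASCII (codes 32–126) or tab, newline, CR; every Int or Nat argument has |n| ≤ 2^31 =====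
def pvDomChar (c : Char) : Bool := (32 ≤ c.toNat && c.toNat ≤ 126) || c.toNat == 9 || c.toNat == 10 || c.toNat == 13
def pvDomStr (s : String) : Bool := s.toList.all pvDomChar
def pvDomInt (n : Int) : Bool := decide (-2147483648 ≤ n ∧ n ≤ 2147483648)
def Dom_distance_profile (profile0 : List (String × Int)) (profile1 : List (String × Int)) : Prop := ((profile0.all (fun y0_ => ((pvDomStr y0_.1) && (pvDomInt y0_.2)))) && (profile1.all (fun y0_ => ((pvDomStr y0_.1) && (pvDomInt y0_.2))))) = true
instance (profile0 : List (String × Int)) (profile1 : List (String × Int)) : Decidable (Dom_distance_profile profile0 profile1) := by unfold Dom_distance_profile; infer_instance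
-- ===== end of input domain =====

-- B replaces A's union set (with per-key double lookups and abs inside the loop) by a single
-- signed-difference dict built in two modify-folds, summing |values| once at the end;
-- objective: alternative. Values are typed Int, so A's 'is not None' guard is exactly
-- 'get? = some v' (getD k 0), ported as such.

-- ===== PORT A =====
def distance_profile (profile0 : List (String × Int)) (profile1 : List (String × Int)) : Int :=
  let d0 := PySem.Dict.ofList profile0
  let d1 := PySem.Dict.ofList profile1
  -- union = set(); for k in profile0.keys(): union.add(k); for k in profile1.keys(): union.add(k)
  let union : PySem.Set String :=
    PySem.Set.update (PySem.Set.update PySem.Set.empty (PySem.Dict.keys d0)) (PySem.Dict.keys d1)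
  -- for k in union: v0, v1 = 0, 0; if get is not None: v = int(get); agg += abs(v0 - v1)
  -- (sum over the set: order-independent)
  union.foldl (fun agg k =>
    let v0 := PySem.Dict.getD d0 k 0
    let v1 := PySem.Dict.getD d1 k 0
    agg + |v0 - v1|) 0

-- ===== PORT B =====
def distance_profile_alt (profile0 : List (String × Int)) (profile1 : List (String × Int)) : Int :=
  let d0 := PySem.Dict.ofList profile0
  let d1 := PySem.Dict.ofList profile1
  -- diff = {}; for k, v in profile0.items(): diff[k] = diff.get(k, 0) + v
  let diff := (PySem.Dict.items d0).foldl
    (fun d p => PySem.Dict.modify d p.1 0 (· + p.2)) PySem.Dict.empty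
  -- for k, v in profile1.items(): diff[k] = diff.get(k, 0) - v
  let diff := (PySem.Dict.items d1).foldl
    (fun d p => PySem.Dict.modify d p.1 0 (· - p.2)) diff
  -- return sum(abs(x) for x in diff.values())
  ((PySem.Dict.values diff).map (fun x => |x|)).sum

-- ===== PRECONDITION & SPEC =====
def Spec_distance_profile (profile0 : List (String × Int)) (profile1 : List (String × Int)) (out : Int) : Prop := out = distance_profile_alt profile0 profile1
instance (profile0 : List (String × Int)) (profile1 : List (String × Int)) (out : Int) : Decidable (Spec_distance_profile profile0 profile1 out) := by unfold Spec_distance_profile; infer_instance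

-- ===== CLAIM (what is proved, stated in full; the proofs are below) =====
def Claim_equal_distance_profile : Prop := ∀ (profile0 : List (String × Int)) (profile1 : List (String × Int)), Dom_distance_profile profile0 profile1 → Spec_distance_profile profile0 profile1 (distance_profile profile0 profile1)

-- ===== LEMMAS AND PROOFS =====

-- B's first loop: value at k after the add-fold
theorem getD_fold_add (l : List (String × Int)) (d : PySem.Dict String Int) (k : String) :
    (l.foldl (fun d p => PySem.Dict.modify d p.1 0 (· + p.2)) d).getD k 0
      = d.getD k 0 + ((l.filter (fun p => p.1 == k)).map (·.2)).sum := by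
  induction l generalizing d with
  | nil => simp
  | cons p t ih =>
    rw [List.foldl_cons, ih]
    by_cases h : p.1 = k
    · simp [h]
      ring
    · have h' : ¬ k = p.1 := fun e => h e.symm
      simp [h, h', PySem.Dict.getD_modify]

-- B's second loop: value at k after the subtract-fold
theorem getD_fold_sub (l : List (String × Int)) (d : PySem.Dict String Int) (k : String) :
    (l.foldl (fun d p => PySem.Dict.modify d p.1 0 (· - p.2)) d).getD k 0
      = d.getD k 0 - ((l.filter (fun p => p.1 == k)).map (·.2)).sum := by
  induction l generalizing d with
  | nil => simp
  | cons p t ih =>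
    rw [List.foldl_cons, ih]
    by_cases h : p.1 = k
    · simp [h]
      ring
    · have h' : ¬ k = p.1 := fun e => h e.symm
      simp [h, h', PySem.Dict.getD_modify]

-- with unique keys, the filter by one key picks exactly its pair
theorem filter_key_singleton (l : List (String × Int)) (k : String) (v : Int)
    (hm : (k, v) ∈ l) (hnd : (l.map Prod.fst).Nodup) :
    l.filter (fun p => p.1 == k) = [(k, v)] := by
  induction l with
  | nil => simp at hm
  | cons q t iht =>
    simp only [List.map_cons, List.nodup_cons] at hnd
    rcases List.mem_cons.mp hm with rfl | hmt
    · have ht : t.filter (fun p => p.1 == k) = [] := by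
        rw [List.filter_eq_nil_iff]
        intro p hp hpk
        have hk : p.1 = k := by simpa using hpk
        have hmem : p.1 ∈ t.map Prod.fst := List.mem_map_of_mem hp
        exact hnd.1 (hk ▸ hmem)
      simp [ht]
    · have hq : ¬ (q.1 == k) = true := by
        intro hqk
        have hk : q.1 = k := by simpa using hqk
        have hmem : (k, v).1 ∈ t.map Prod.fst := List.mem_map_of_mem hmt
        exact hnd.1 (by rw [hk]; exact hmem)
      simp [hq, iht hmt hnd.2]

-- with unique keys, the filtered sum over a dict's items is its lookup
theorem sum_filter_items (d : PySem.Dict String Int) (k : String) (hn : d.keys.Nodup) :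
    (((PySem.Dict.items d).filter (fun p => p.1 == k)).map (·.2)).sum = d.getD k 0 := by
  by_cases h : PySem.Dict.contains d k = true
  · rw [PySem.Dict.contains_eq_isSome_get?] at h
    obtain ⟨v, hv⟩ := Option.isSome_iff_exists.mp h
    rw [filter_key_singleton _ k v (PySem.Dict.mem_items_of_get?_eq_some d hv) hn,
      PySem.Dict.getD_of_get?_eq_some d 0 hv]
    simp
  · have h' : PySem.Dict.contains d k = false := by simpa using h
    have hfil : (PySem.Dict.items d).filter (fun p => p.1 == k) = [] := by
      rw [List.filter_eq_nil_iff]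
      intro p hp hpk
      have hk : p.1 = k := by simpa using hpk
      have : k ∈ d.keys := hk ▸ PySem.Dict.mem_keys_of_mem_items d hp
      rw [PySem.Dict.contains_iff_mem_keys] at h
      exact h this
    rw [hfil, PySem.Dict.getD_of_not_contains _ _ h']
    simp

theorem distance_profile_spec : Claim_equal_distance_profile := by
  intro profile0 profile1 _
  unfold Spec_distance_profile distance_profile distance_profile_alt
  dsimp only
  set d0 := PySem.Dict.ofList profile0 with hd0
  set d1 := PySem.Dict.ofList profile1 with hd1
  have hn0 : (PySem.Dict.keys d0).Nodup := PySem.Dict.nodup_keys_ofList profile0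
  have hn1 : (PySem.Dict.keys d1).Nodup := PySem.Dict.nodup_keys_ofList profile1
  set diff := (PySem.Dict.items d1).foldl (fun d p => PySem.Dict.modify d p.1 0 (· - p.2))
    ((PySem.Dict.items d0).foldl (fun d p => PySem.Dict.modify d p.1 0 (· + p.2)) PySem.Dict.empty)
    with hdiff
  -- diff's keys are exactly A's union set
  have hkeys : PySem.Dict.keys diff
      = PySem.Set.update (PySem.Set.update PySem.Set.empty (PySem.Dict.keys d0)) (PySem.Dict.keys d1) := by
    rw [hdiff, PySem.Dict.keys_foldl_modify_key, PySem.Dict.keys_foldl_modify_key]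
    rfl
  -- diff's keys are unique
  have hnd : (PySem.Dict.keys diff).Nodup := by
    rw [hdiff]
    exact PySem.Dict.nodup_keys_foldl_modify_key _ _ _ _ _
      (PySem.Dict.nodup_keys_foldl_modify_key _ _ _ _ _ PySem.Dict.nodup_keys_empty)
  -- diff's value at each key is v0 - v1
  have hval : ∀ k, diff.getD k 0 = d0.getD k 0 - d1.getD k 0 := by
    intro k
    rw [hdiff, getD_fold_sub, getD_fold_add, sum_filter_items d0 k hn0, sum_filter_items d1 k hn1]
    simp
  -- both sides are sums over the union keys
  rw [PySem.List.foldl_add, PySem.Dict.values_eq_map_keys diff hnd 0, hkeys, List.map_map]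
  simp only [zero_add]
  exact congrArg List.sum (List.map_congr_left
    (fun k _ => by simp only [Function.comp_apply]; rw [hval k]))
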